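-- pv_equiv track=rewrite | github.com/BrendaCarandia/Practicas-de-Criptograf-a | Practica2_Metodo_Vigenere_Kasiski.py | analizar_repeticiones_kasiski
-- ===== SOURCE A (Python) =====
-- def analizar_repeticiones_kasiski(criptograma, min_longitud_secuencia=3):
--
--     repeticiones_encontradas = {}
--     longitud_criptograma = len(criptograma)
--
--     # Iterar sobre todas las posibles longitudes de secuencia
--     for longitud_actual in range(min_longitud_secuencia, longitud_criptograma // 2 + 1):
--         for i in range(longitud_criptograma - longitud_actual + 1):
--             secuencia = criptograma[i : i + longitud_actual]
--
--             # Buscar esta secuencia en el resto del criptograma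
--             # Empezamos la búsqueda desde la posición i + 1 para encontrar ocurrencias posteriores
--             for j in range(i + 1, longitud_criptograma - longitud_actual + 1):
--                 if criptograma[j : j + longitud_actual] == secuencia:
--                     # Si la secuencia ya está en el diccionario, añadir la nueva posición
--                     if secuencia in repeticiones_encontradas:
--                         if i not in repeticiones_encontradas[secuencia]: # Evitar añadir la misma posición
--                             repeticiones_encontradas[secuencia].append(i)
--                         if j not in repeticiones_encontradas[secuencia]:
--                             repeticiones_encontradas[secuencia].append(j)
--                     else:
--                         # Si es la primera vez que encontramos esta repetición
--                         repeticiones_encontradas[secuencia] = [i, j]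
--
--     # Filtrar solo las secuencias que realmente se repiten (tienen más de una posición)
--     # y ordenar las posiciones para facilitar el cálculo de distancias
--     repeticiones_filtradas = {}
--     for seq, positions in repeticiones_encontradas.items():
--         if len(positions) > 1:
--             repeticiones_filtradas[seq] = sorted(list(set(positions))) # Eliminar duplicados y ordenar
--
--     return repeticiones_filtradas
-- ===== SOURCE B (Python) =====
-- def analizar_repeticiones_kasiski(criptograma, min_longitud_secuencia=3):
--     # One grouping pass per sequence length instead of A's per-start rescans:
--     # bucket every start position by its substring, keep buckets of size >= 2,
--     # and merge positions per substring across lengths.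
--     repetidas = {}
--     n = len(criptograma)
--     for longitud in range(min_longitud_secuencia, n // 2 + 1):
--         grupos = {}
--         for i in range(n - longitud + 1):
--             grupos.setdefault(criptograma[i:i + longitud], []).append(i)
--         for seq, pos in grupos.items():
--             if len(pos) > 1:
--                 repetidas.setdefault(seq, set()).update(pos)
--     return {seq: sorted(pos) for seq, pos in repetidas.items()}
-- ===== Notes on version B (the rewrite author's own statement) =====
-- stated objective: alternative
-- what changed: A's inner rescan of the whole text for each start position is replaced by one dictionary bucketing pass per sequence length (group start positions by substring, keep buckets with >= 2 entries, merge positions per substring across lengths).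
import Mathlib
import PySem

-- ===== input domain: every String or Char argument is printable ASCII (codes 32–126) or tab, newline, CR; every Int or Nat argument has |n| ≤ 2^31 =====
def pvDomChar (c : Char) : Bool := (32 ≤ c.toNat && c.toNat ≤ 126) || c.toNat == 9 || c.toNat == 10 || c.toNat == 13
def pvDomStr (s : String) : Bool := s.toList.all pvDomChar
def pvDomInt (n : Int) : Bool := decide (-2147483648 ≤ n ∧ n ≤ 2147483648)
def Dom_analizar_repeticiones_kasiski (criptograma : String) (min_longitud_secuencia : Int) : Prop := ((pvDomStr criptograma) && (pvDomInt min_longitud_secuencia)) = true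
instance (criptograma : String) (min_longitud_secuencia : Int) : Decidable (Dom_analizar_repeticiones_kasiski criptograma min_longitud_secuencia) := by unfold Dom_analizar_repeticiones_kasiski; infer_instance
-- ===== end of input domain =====

-- B replaces A's per-start rescan of the whole text by one dictionary bucketing pass per sequence length.

-- ===== PORT A =====
def analizar_repeticiones_kasiski (criptograma : String) (min_longitud_secuencia : Int) : List (String × List Int) :=
  let n : Int := PySem.Str.len criptograma
  let rep : PySem.Dict String (List Int) :=
    (PySem.List.pyRange min_longitud_secuencia (PySem.Int.floordiv n 2 + 1) 1).foldl (fun rep longitud_actual =>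
      (PySem.List.pyRange 0 (n - longitud_actual + 1) 1).foldl (fun rep i =>
        let secuencia := PySem.Str.slice criptograma (some i) (some (i + longitud_actual))
        (PySem.List.pyRange (i + 1) (n - longitud_actual + 1) 1).foldl (fun rep j =>
          if PySem.Str.slice criptograma (some j) (some (j + longitud_actual)) == secuencia then
            match rep.get? secuencia with
            | some ps =>
                let ps1 := if ps.contains i then ps else ps ++ [i]
                let ps2 := if ps1.contains j then ps1 else ps1 ++ [j]
                rep.insert secuencia ps2
            | none => rep.insert secuencia [i, j]
          else rep) rep) rep) PySem.Dict.empty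
  (rep.items.foldl (fun acc p =>
      if 1 < p.2.length then acc.insert p.1 (PySem.List.sorted (PySem.Set.ofList p.2) (fun x => x) false) else acc)
    (PySem.Dict.empty : PySem.Dict String (List Int))).items

-- ===== PORT B =====
def analizar_repeticiones_kasiski_alt (criptograma : String) (min_longitud_secuencia : Int) : List (String × List Int) :=
  let n : Int := PySem.Str.len criptograma
  let repetidas : PySem.Dict String (PySem.Set Int) :=
    (PySem.List.pyRange min_longitud_secuencia (PySem.Int.floordiv n 2 + 1) 1).foldl (fun repetidas longitud =>
      let grupos : PySem.Dict String (List Int) :=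
        (PySem.List.pyRange 0 (n - longitud + 1) 1).foldl (fun grupos i =>
          grupos.insert (PySem.Str.slice criptograma (some i) (some (i + longitud)))
            (grupos.getD (PySem.Str.slice criptograma (some i) (some (i + longitud))) [] ++ [i]))
          PySem.Dict.empty
      grupos.items.foldl (fun repetidas p =>
        if 1 < p.2.length then
          repetidas.insert p.1 (PySem.Set.update (repetidas.getD p.1 PySem.Set.empty) p.2)
        else repetidas) repetidas) PySem.Dict.empty
  (repetidas.items.foldl (fun acc p => acc.insert p.1 (PySem.List.sorted p.2 (fun x => x) false))
    (PySem.Dict.empty : PySem.Dict String (List Int))).items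

-- ===== PRECONDITION & SPEC =====
def Spec_analizar_repeticiones_kasiski (criptograma : String) (min_longitud_secuencia : Int) (out : List (String × List Int)) : Prop := out = analizar_repeticiones_kasiski_alt criptograma min_longitud_secuencia
instance (criptograma : String) (min_longitud_secuencia : Int) (out : List (String × List Int)) : Decidable (Spec_analizar_repeticiones_kasiski criptograma min_longitud_secuencia out) := by unfold Spec_analizar_repeticiones_kasiski; infer_instance

-- ===== CLAIM (what is proved, stated in full; the proofs are below) =====
def Claim_equal_analizar_repeticiones_kasiski : Prop := ∀ (criptograma : String) (min_longitud_secuencia : Int), Dom_analizar_repeticiones_kasiski criptograma min_longitud_secuencia → Spec_analizar_repeticiones_kasiski criptograma min_longitud_secuencia (analizar_repeticiones_kasiski criptograma min_longitud_secuencia)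

-- ===== LEMMAS AND PROOFS =====

-- The body of A's inner j-loop once the slices matched (sec = the current secuencia).
def pvBody (sec : String) (i : Int) (rep : PySem.Dict String (List Int)) (j : Int) : PySem.Dict String (List Int) :=
  match rep.get? sec with
  | some ps =>
      let ps1 := if ps.contains i then ps else ps ++ [i]
      let ps2 := if ps1.contains j then ps1 else ps1 ++ [j]
      rep.insert sec ps2
  | none => rep.insert sec [i, j]

-- One full iteration of A's middle i-loop (f i abstracts criptograma[i:i+L], E = n-L+1).
def pvStep (f : Int → String) (E : Int) (rep : PySem.Dict String (List Int)) (i : Int) : PySem.Dict String (List Int) :=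
  (PySem.List.pyRange (i + 1) E 1).foldl (fun rep j => if f j == f i then pvBody (f i) i rep j else rep) rep

-- Later occurrences of the slice at i (A's matching j's).
def pvM (f : Int → String) (E i : Int) : List Int :=
  (PySem.List.pyRange (i + 1) E 1).filter (fun j => f j == f i)

def pvPairs (f : Int → String) (a E : Int) : List (String × Int) :=
  (PySem.List.pyRange a E 1).map (fun i => (f i, i))

-- Group a pair list by key, first-occurrence order (the contents of B's `grupos`).
def pvGather : List (String × Int) → List (String × List Int)
  | [] => []
  | (k, v) :: r =>
      (k, v :: (r.filter (fun p => p.1 == k)).map (·.2)) :: pvGather (r.filter (fun p => p.1 != k))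
termination_by l => l.length
decreasing_by simp only [List.length_cons, List.length_unattach]; exact Nat.lt_succ_of_le ((List.length_filter_le _ _).trans (by simp))

def pvQ (g : String × List Int) : Bool := decide (1 < g.2.length)

def pvMergeStep (d : PySem.Dict String (List Int)) (g : String × List Int) : PySem.Dict String (List Int) :=
  d.insert g.1 (PySem.Set.update (d.getD g.1 PySem.Set.empty) g.2)

def pvMerge (d : PySem.Dict String (List Int)) (l : List (String × List Int)) : PySem.Dict String (List Int) :=
  l.foldl pvMergeStep d

def pvInv (d : PySem.Dict String (List Int)) : Prop :=
  d.keys.Nodup ∧ ∀ p ∈ d.items, 1 < p.2.length ∧ p.2.Nodup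

-- generic: a fold guarded by a decidable Prop is a fold over the filtered list (Bool form is List.foldl_filter)
lemma pv_foldl_filter_prop {α β : Type} {P : α → Prop} [DecidablePred P] (f : β → α → β) (l : List α) (init : β) :
    (l.filter (fun y => decide (P y))).foldl f init = l.foldl (fun x y => if P y then f x y else x) init := by
  rw [List.foldl_filter]
  congr 1; funext x y; by_cases h : P y <;> simp [h]

lemma pv_insert_self {d : PySem.Dict String (List Int)} {k : String} {v : List Int}
    (h : d.get? k = some v) (hnd : d.keys.Nodup) : d.insert k v = d := by
  have hc : d.contains k = true := by
    rw [PySem.Dict.contains_eq_isSome_get?, h]; rfl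
  apply PySem.Dict.ext
  rw [PySem.Dict.items_insert_of_contains d v hc]
  conv_rhs => rw [← List.map_id d.items]
  apply List.map_congr_left
  intro p hp
  obtain ⟨p1, p2⟩ := p
  by_cases hk : p1 = k
  · subst hk
    have h2 : d.get? p1 = some p2 := PySem.Dict.get?_of_mem_items d hp hnd
    rw [h] at h2
    simp [Option.some_inj.mp h2]
  · simp [hk]

lemma pv_mem_update {x : Int} {s : PySem.Set Int} {xs : List Int} (h : x ∈ xs) :
    x ∈ PySem.Set.update s xs := by
  rw [PySem.Set.update_eq_append_filter]
  by_cases hs : x ∈ s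
  · exact List.mem_append_left _ hs
  · refine List.mem_append_right _ ?_
    rw [List.mem_filter]
    refine ⟨by rw [PySem.Set.mem_ofList]; exact h, ?_⟩
    simp [PySem.Set.contains, hs]

lemma pv_add_mem {s : PySem.Set Int} {x : Int} (h : x ∈ s) : PySem.Set.add s x = s := by
  simp [PySem.Set.add, h]


lemma pvBody_eq (sec : String) (i j : Int) (D : PySem.Dict String (List Int)) (hij : i ≠ j) :
    pvBody sec i D j = D.insert sec (PySem.Set.add (PySem.Set.add (D.getD sec PySem.Set.empty) i) j) := by
  cases hD : D.get? sec with
  | none =>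
    have : D.getD sec PySem.Set.empty = [] := by
      simp [PySem.Dict.getD_eq_get?_getD, hD, PySem.Set.empty]
    have hadd : PySem.Set.add (PySem.Set.add ([] : List Int) i) j = [i, j] := by
      simp only [PySem.Set.add]
      norm_num [hij.symm]
    simp only [pvBody, hD, this, hadd]
  | some ps =>
    have : D.getD sec PySem.Set.empty = ps := by
      simp [PySem.Dict.getD_eq_get?_getD, hD]
    simp only [pvBody, hD, this, PySem.Set.add]
    rfl


lemma pvBodyFold (sec : String) (i : Int) :
    ∀ (M : List Int) (D : PySem.Dict String (List Int)), M ≠ [] → i ∉ M →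
      M.foldl (pvBody sec i) D = D.insert sec (PySem.Set.update (D.getD sec PySem.Set.empty) (i :: M)) := by
  intro M
  induction M with
  | nil => intro D h; exact absurd rfl h
  | cons j1 M' ih =>
    intro D _ hi
    have hij : i ≠ j1 := fun h => hi (h ▸ List.mem_cons_self)
    by_cases hM' : M' = []
    · subst hM'
      simp only [List.foldl_cons, List.foldl_nil, pvBody_eq sec i j1 D hij]
      rfl
    · simp only [List.foldl_cons, pvBody_eq sec i j1 D hij]
      rw [ih _ hM' (fun h => hi (List.mem_cons_of_mem _ h))]
      rw [PySem.Dict.insert_insert_self]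
      congr 1
      rw [PySem.Dict.getD_insert_self]
      show PySem.Set.update _ (i :: M') = PySem.Set.update _ (i :: j1 :: M')
      simp only [PySem.Set.update, List.foldl_cons]
      congr 1
      exact pv_add_mem (by
        rw [PySem.Set.mem_add]; left; rw [PySem.Set.mem_add]; right; rfl)

lemma pvStep_eq (f : Int → String) (E : Int) (D : PySem.Dict String (List Int)) (i : Int) :
    pvStep f E D i = if pvM f E i = [] then D else pvMergeStep D (f i, i :: pvM f E i) := by
  have h1 : pvStep f E D i = (pvM f E i).foldl (pvBody (f i) i) D := by
    rw [pvStep, pvM, List.foldl_filter]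
  rw [h1]
  by_cases h : pvM f E i = []
  · simp [h]
  · rw [if_neg h]
    have hi : i ∉ pvM f E i := by
      intro hmem
      have := (List.mem_filter.mp hmem).1
      rw [PySem.List.mem_pyRange_one] at this
      omega
    rw [pvBodyFold (f i) i _ D h hi]
    rfl

lemma pvGather_sub : ∀ (l : List (String × Int)) (g : String × List Int), g ∈ pvGather l → ∀ x ∈ g.2, (g.1, x) ∈ l := by
  intro l
  induction hn : l.length using Nat.strong_induction_on generalizing l with
  | _ n ih =>
  cases l with
  | nil => intro g hg; simp [pvGather] at hg
  | cons p r =>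
    obtain ⟨k, v⟩ := p
    intro g hg x hx
    rw [pvGather] at hg
    rcases (List.mem_cons).mp hg with hg | hg
    · subst hg
      simp only at hx
      rcases (List.mem_cons).mp hx with hx | hx
      · subst hx; exact List.mem_cons_self
      · simp only [List.mem_map, List.mem_filter] at hx
        obtain ⟨q, ⟨hq, hqk⟩, hx⟩ := hx
        refine List.mem_cons_of_mem _ ?_
        have hk : q.1 = k := by simpa using hqk
        have : (k, x) = q := by cases q; simp_all
        rw [this]; exact hq
    · have hlt : (r.filter (fun p => p.1 != k)).length < n := by
        subst hn; simp only [List.length_cons]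
        exact Nat.lt_succ_of_le (List.length_filter_le _ _)
      have := ih _ hlt _ rfl g hg x hx
      exact List.mem_cons_of_mem _ (List.mem_filter.mp this).1

lemma pvGather_ne_nil : ∀ (l : List (String × Int)) (g : String × List Int), g ∈ pvGather l → g.2 ≠ [] := by
  intro l
  induction hn : l.length using Nat.strong_induction_on generalizing l with
  | _ n ih =>
  cases l with
  | nil => intro g hg; simp [pvGather] at hg
  | cons p r =>
    obtain ⟨k, v⟩ := p
    intro g hg
    rw [pvGather] at hg
    rcases (List.mem_cons).mp hg with hg | hg
    · subst hg; simp
    · have hlt : (r.filter (fun p => p.1 != k)).length < n := by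
        subst hn; simp only [List.length_cons]
        exact Nat.lt_succ_of_le (List.length_filter_le _ _)
      exact ih _ hlt _ rfl g hg

lemma pvGather_filter_ne (s : String) : ∀ (l : List (String × Int)),
    pvGather (l.filter (fun p => p.1 != s)) = (pvGather l).filter (fun g => g.1 != s) := by
  intro l
  induction hn : l.length using Nat.strong_induction_on generalizing l with
  | _ n ih =>
  cases l with
  | nil => simp [pvGather]
  | cons p r =>
    obtain ⟨k, v⟩ := p
    have hlt : ∀ (q : (String × Int) → Bool), (r.filter q).length < n := by
      intro q; subst hn; simp only [List.length_cons]
      exact Nat.lt_succ_of_le (List.length_filter_le _ _)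
    by_cases hk : k = s
    · subst hk
      rw [List.filter_cons_of_neg (by simp), pvGather, List.filter_cons_of_neg (by simp)]
      rw [← ih _ (hlt _) _ rfl, List.filter_filter]
      congr 1
      apply List.filter_congr
      intro p _
      by_cases hpk : p.1 = k <;> simp [hpk]
    · rw [List.filter_cons_of_pos (by simp [hk]), pvGather, pvGather,
        List.filter_cons_of_pos (by simp [hk])]
      congr 1
      · congr 2
        rw [List.filter_filter]
        congr 1
        apply List.filter_congr
        intro p _
        by_cases hpk : p.1 = k <;> simp_all
      · rw [List.filter_filter, ← ih _ (hlt _) _ rfl, List.filter_filter]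
        congr 1
        apply List.filter_congr
        intro p _
        by_cases hpk : p.1 = k <;> by_cases hps : p.1 = s <;> simp_all [Bool.and_comm]

lemma pvMerge_drop (s : String) : ∀ (l : List (String × List Int)) (d : PySem.Dict String (List Int)),
    d.keys.Nodup → (∀ g ∈ l, g.1 = s → g.2 ≠ [] ∧ ∀ x ∈ g.2, x ∈ d.getD s []) →
    pvMerge d (l.filter (fun g => g.1 != s)) = pvMerge d l := by
  intro l
  induction l with
  | nil => intro d _ _; rfl
  | cons g r ih =>
    intro d hnd hsub
    by_cases hg : g.1 = s
    · rw [List.filter_cons_of_neg (by simp [hg])]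
      obtain ⟨hne, hmem⟩ := hsub g List.mem_cons_self hg
      have hstep : pvMergeStep d g = d := by
        obtain ⟨x, hx⟩ := List.exists_mem_of_ne_nil _ hne
        cases hq : d.get? s with
        | none =>
          have hnil : d.getD s [] = [] := by rw [PySem.Dict.getD_eq_get?_getD, hq]; rfl
          exact absurd (hmem x hx) (by rw [hnil]; exact List.not_mem_nil)
        | some ps =>
          have hgd : d.getD s [] = ps := by rw [PySem.Dict.getD_eq_get?_getD, hq]; rfl
          have hupd : PySem.Set.update (d.getD g.1 PySem.Set.empty) g.2 = ps := by
            rw [hg]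
            show PySem.Set.update (d.getD s []) g.2 = ps
            rw [hgd, PySem.Set.update_eq_append_filter, List.filter_eq_nil_iff.mpr, List.append_nil]
            intro y hy
            have hyg : y ∈ g.2 := by rwa [PySem.Set.mem_ofList] at hy
            have hyp : y ∈ ps := hgd ▸ hmem y hyg
            simp [PySem.Set.contains_eq_listContains, hyp]
          show d.insert g.1 _ = d
          rw [hupd, hg]
          exact pv_insert_self hq hnd
      rw [show pvMerge d (g :: r) = pvMerge (pvMergeStep d g) r from rfl, hstep]
      exact ih d hnd (fun g' hg' => hsub g' (List.mem_cons_of_mem _ hg'))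
    · rw [List.filter_cons_of_pos (by simp [hg])]
      show pvMerge (pvMergeStep d g) _ = pvMerge (pvMergeStep d g) r
      apply ih
      · exact PySem.Dict.nodup_keys_insert _ _ _ hnd
      · intro g' hg' hg's
        refine ⟨(hsub g' (List.mem_cons_of_mem _ hg') hg's).1, ?_⟩
        have : (pvMergeStep d g).getD s [] = d.getD s [] := by
          show (d.insert g.1 _).getD s [] = _
          exact PySem.Dict.getD_insert_of_ne _ _ _ (fun h => hg (h.symm))
        rw [this]
        exact (hsub g' (List.mem_cons_of_mem _ hg') hg's).2

lemma pvPairs_filter_map (f : Int → String) (s : String) (b E : Int) :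
    ((pvPairs f b E).filter (fun p => p.1 == s)).map (·.2) = (PySem.List.pyRange b E 1).filter (fun j => f j == s) := by
  simp [pvPairs, List.filter_map, List.map_map, Function.comp_def]

lemma pvRound (f : Int → String) (E : Int) : ∀ (a : Int) (D : PySem.Dict String (List Int)), D.keys.Nodup →
    (PySem.List.pyRange a E 1).foldl (pvStep f E) D
      = pvMerge D ((pvGather (pvPairs f a E)).filter pvQ) := by
  intro a D
  induction hn : (E - a).toNat using Nat.strong_induction_on generalizing a D with
  | _ n ih =>
  intro hnd
  by_cases hae : a < E
  · rw [PySem.List.pyRange_one_cons hae, List.foldl_cons, pvStep_eq]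
    have hpairs : pvPairs f a E = (f a, a) :: pvPairs f (a + 1) E := by
      rw [pvPairs, PySem.List.pyRange_one_cons hae, List.map_cons]; rfl
    rw [hpairs, pvGather]
    have hocc : ((pvPairs f (a + 1) E).filter (fun p => p.1 == f a)).map (·.2) = pvM f E a :=
      pvPairs_filter_map f (f a) (a + 1) E
    have hmem_pairs : ∀ (x : Int), ((f a : String), x) ∈ pvPairs f (a + 1) E → x ∈ pvM f E a := by
      intro x hx
      rw [pvPairs, List.mem_map] at hx
      obtain ⟨i, hi, hix⟩ := hx
      have h1 : f i = f a := congrArg Prod.fst hix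
      have h2 : i = x := congrArg Prod.snd hix
      rw [pvM, List.mem_filter]
      exact ⟨h2 ▸ hi, by rw [← h2, h1]; exact beq_self_eq_true _⟩
    have hlt : (E - (a + 1)).toNat < n := by omega
    by_cases hM : pvM f E a = []
    · rw [if_pos hM, hocc, hM]
      rw [List.filter_cons_of_neg (by simp [pvQ])]
      have hkeys : (pvPairs f (a + 1) E).filter (fun p => p.1 != f a) = pvPairs f (a + 1) E := by
        apply List.filter_eq_self.mpr
        intro p hp
        rcases p with ⟨pk, px⟩
        by_cases hpk : pk = f a
        · subst hpk
          exact absurd (hM ▸ hmem_pairs px hp) (List.not_mem_nil)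
        · simpa using hpk
      rw [hkeys]
      exact ih _ hlt (a + 1) D rfl hnd
    · rw [if_neg hM, hocc]
      have hQ : pvQ (f a, a :: pvM f E a) = true := by
        rcases List.exists_mem_of_ne_nil _ hM with ⟨y, hy⟩
        rcases List.exists_cons_of_ne_nil hM with ⟨y0, M0, hM0⟩
        simp [pvQ, hM0]
      rw [List.filter_cons_of_pos hQ]
      rw [show pvMerge D ((f a, a :: pvM f E a) :: ((pvGather ((pvPairs f (a + 1) E).filter (fun p => p.1 != f a))).filter pvQ))
            = pvMerge (pvMergeStep D (f a, a :: pvM f E a)) ((pvGather ((pvPairs f (a + 1) E).filter (fun p => p.1 != f a))).filter pvQ) from rfl]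
      have hnd' : (pvMergeStep D (f a, a :: pvM f E a)).keys.Nodup :=
        PySem.Dict.nodup_keys_insert _ _ _ hnd
      rw [ih _ hlt (a + 1) _ rfl hnd']
      rw [pvGather_filter_ne]
      rw [List.filter_comm]
      refine (pvMerge_drop (f a) _ _ hnd' ?_).symm
      intro g hg hgk
      have hg' : g ∈ pvGather (pvPairs f (a + 1) E) := (List.mem_filter.mp hg).1
      refine ⟨pvGather_ne_nil _ g hg', ?_⟩
      intro x hx
      have hpx : ((f a : String), x) ∈ pvPairs f (a + 1) E := hgk ▸ pvGather_sub _ g hg' x hx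
      have hxM : x ∈ pvM f E a := hmem_pairs x hpx
      show x ∈ (pvMergeStep D (f a, a :: pvM f E a)).getD (f a) []
      rw [show (pvMergeStep D (f a, a :: pvM f E a)).getD (f a) []
            = PySem.Set.update (D.getD (f a) PySem.Set.empty) (a :: pvM f E a) from
          PySem.Dict.getD_insert_self _ _ _ _]
      exact pv_mem_update (List.mem_cons_of_mem _ hxM)
  · rw [PySem.List.pyRange_one_eq_nil (show E ≤ a by omega)]
    simp [pvPairs, pvGather, pvMerge, PySem.List.pyRange_one_eq_nil (show E ≤ a by omega)]

lemma pvGather_key_mem : ∀ (l : List (String × Int)) (g : String × List Int), g ∈ pvGather l → g.1 ∈ l.map (·.1) := by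
  intro l g hg
  obtain ⟨x, hx⟩ := List.exists_mem_of_ne_nil _ (pvGather_ne_nil l g hg)
  exact List.mem_map.mpr ⟨(g.1, x), pvGather_sub l g hg x hx, rfl⟩

lemma pvGatherAppend (k : String) (v : Int) : ∀ (l : List (String × Int)),
    pvGather (l ++ [(k, v)]) =
      if (l.map (·.1)).contains k then
        (pvGather l).map (fun g => if g.1 == k then (g.1, g.2 ++ [v]) else g)
      else pvGather l ++ [(k, [v])] := by
  intro l
  induction hn : l.length using Nat.strong_induction_on generalizing l with
  | _ n ih =>
  cases l with
  | nil => simp [pvGather]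
  | cons p r =>
    obtain ⟨k0, v0⟩ := p
    have hlt : ∀ (q : (String × Int) → Bool), (r.filter q).length < n := by
      intro q; subst hn; simp only [List.length_cons]
      exact Nat.lt_succ_of_le (List.length_filter_le _ _)
    rw [List.cons_append, pvGather, pvGather]
    by_cases hk : k = k0
    · subst hk
      have h1 : List.filter (fun p => p.1 == k) (r ++ [(k, v)]) = r.filter (fun p => p.1 == k) ++ [(k, v)] := by
        rw [List.filter_append]; congr 1; simp
      have h2 : List.filter (fun p => p.1 != k) (r ++ [(k, v)]) = r.filter (fun p => p.1 != k) := by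
        rw [List.filter_append]; simp
      rw [h1, h2, if_pos (by simp), List.map_cons]
      congr 1
      · rw [if_pos (by simp)]
        simp [List.map_append]
      · conv_lhs => rw [← List.map_id (pvGather (r.filter (fun p => p.1 != k)))]
        apply List.map_congr_left
        intro g hg
        have hmem := pvGather_key_mem _ g hg
        have hne : (g.1 == k) = false := by
          simp only [List.mem_map, List.mem_filter] at hmem
          obtain ⟨q, ⟨_, hq⟩, hgq⟩ := hmem
          simp only [bne_iff_ne, ne_eq] at hq
          simp [← hgq, hq]
        simp [hne]
    · have h1 : List.filter (fun p => p.1 == k0) (r ++ [(k, v)]) = r.filter (fun p => p.1 == k0) := by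
        rw [List.filter_append]; simp [hk]
      have h2 : List.filter (fun p => p.1 != k0) (r ++ [(k, v)]) = r.filter (fun p => p.1 != k0) ++ [(k, v)] := by
        rw [List.filter_append]; congr 1; simp [hk]
      rw [h1, h2, ih _ (hlt _) _ rfl]
      have hcont : ((r.filter (fun p => p.1 != k0)).map (·.1)).contains k = (((k0, v0) :: r).map (·.1)).contains k := by
        simp only [List.map_cons, List.contains_cons]
        rw [show (k == k0) = false by simp [hk]]
        simp only [Bool.false_or, List.contains_eq_mem, List.mem_map, List.mem_filter, decide_eq_decide]
        constructor
        · rintro ⟨q, ⟨hq, _⟩, hqk⟩; exact ⟨q, hq, hqk⟩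
        · rintro ⟨q, hq, hqk⟩
          refine ⟨q, ⟨hq, ?_⟩, hqk⟩
          have : q.1 = k := hqk
          simp [this, hk]
      rw [hcont]
      by_cases hc : ((((k0, v0) :: r).map (·.1)).contains k) = true
      · rw [if_pos hc, if_pos hc, List.map_cons]
        congr 1
        rw [if_neg (by simp [Ne.symm hk])]
      · rw [if_neg hc, if_neg hc, List.cons_append]

lemma pvGruposItems : ∀ (l : List (String × Int)),
    ((l.foldl (fun g p => g.insert p.1 (g.getD p.1 [] ++ [p.2])) PySem.Dict.empty)).items = pvGather l := by
  intro l
  induction l using List.reverseRecOn with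
  | nil => simp [pvGather, PySem.Dict.empty]
  | append_singleton r p ihr =>
    obtain ⟨k, v⟩ := p
    rw [List.foldl_append, List.foldl_cons, List.foldl_nil, pvGatherAppend]
    have hnd : (r.foldl (fun g p => g.insert p.1 (g.getD p.1 [] ++ [p.2])) PySem.Dict.empty).keys.Nodup :=
      PySem.Dict.nodup_keys_foldl_insert_key r (·.1) _ _ PySem.Dict.nodup_keys_empty
    have hkeys : (r.foldl (fun g p => g.insert p.1 (g.getD p.1 [] ++ [p.2])) PySem.Dict.empty).keys
        = PySem.Set.ofList (r.map (·.1)) := by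
      rw [PySem.Dict.keys_foldl_insert_key r (·.1) _ _]
      rfl
    have hcont : ∀ (b : Bool), ((r.map (·.1)).contains k) = b →
        (r.foldl (fun g p => g.insert p.1 (g.getD p.1 [] ++ [p.2])) PySem.Dict.empty).contains k = b := by
      intro b hb
      rw [PySem.Dict.contains_eq_decide_mem_keys, hkeys]
      rw [← hb]
      simp [PySem.Set.mem_ofList]
    by_cases hc : ((r.map (·.1)).contains k) = true
    · rw [if_pos hc]
      rw [PySem.Dict.items_insert_of_contains _ _ (hcont true hc), ihr]
      apply List.map_congr_left
      intro g hg
      by_cases hgk : (g.1 == k) = true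
      · rw [if_pos hgk, if_pos hgk]
        have hk : g.1 = k := by simpa using hgk
        have : (k, g.2) ∈ (r.foldl (fun g p => g.insert p.1 (g.getD p.1 [] ++ [p.2])) PySem.Dict.empty).items := by
          rw [ihr]; rw [← hk]; exact hg
        rw [PySem.Dict.getD_of_mem_items _ this hnd]
        rw [hk]
      · rw [if_neg (by simp_all), if_neg (by simp_all)]
    · rw [if_neg hc]
      rw [PySem.Dict.items_insert_of_not_contains _ _ (hcont false (by simp_all)), ihr]
      rw [PySem.Dict.getD_of_not_contains _ _ (hcont false (by simp_all))]
      simp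

lemma pvGather_pairwise : ∀ (l : List (String × Int)), l.Pairwise (fun p q => p.2 < q.2) →
    ∀ g ∈ pvGather l, g.2.Pairwise (· < ·) := by
  intro l
  induction hn : l.length using Nat.strong_induction_on generalizing l with
  | _ n ih =>
  cases l with
  | nil => intro _ g hg; simp [pvGather] at hg
  | cons p r =>
    obtain ⟨k, v⟩ := p
    intro hpw g hg
    rw [pvGather] at hg
    have hpw' := List.pairwise_cons.mp hpw
    rcases (List.mem_cons).mp hg with hg | hg
    · subst hg
      simp only
      refine List.pairwise_cons.mpr ⟨?_, ?_⟩
      · intro y hy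
        simp only [List.mem_map, List.mem_filter] at hy
        obtain ⟨q, ⟨hq, _⟩, hy⟩ := hy
        subst hy; exact hpw'.1 q hq
      · have : ((r.filter (fun p => p.1 == k)).map (·.2)).Pairwise (· < ·) := by
          exact (List.Pairwise.map _ (fun a b h => h) ((hpw'.2).sublist List.filter_sublist))
        exact this
    · have hlt : (r.filter (fun p => p.1 != k)).length < n := by
        subst hn; simp only [List.length_cons]
        exact Nat.lt_succ_of_le (List.length_filter_le _ _)
      exact ih _ hlt _ rfl ((hpw'.2).sublist List.filter_sublist) g hg

lemma pvMerge_inv : ∀ (l : List (String × List Int)) (d : PySem.Dict String (List Int)),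
    pvInv d → (∀ g ∈ l, 1 < g.2.length ∧ g.2.Nodup) → pvInv (pvMerge d l) := by
  intro l
  induction l with
  | nil => intro d hd _; exact hd
  | cons g r ih =>
    intro d hd hl
    show pvInv (pvMerge (pvMergeStep d g) r)
    apply ih _ _ (fun g' hg' => hl g' (List.mem_cons_of_mem _ hg'))
    obtain ⟨hnd, hval⟩ := hd
    obtain ⟨hglen, hgnd⟩ := hl g List.mem_cons_self
    constructor
    · exact PySem.Dict.nodup_keys_insert _ _ _ hnd
    · intro p hp
      rw [show pvMergeStep d g = d.insert g.1 (PySem.Set.update (d.getD g.1 PySem.Set.empty) g.2) from rfl] at hp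
      rw [PySem.Dict.mem_items_insert] at hp
      rcases hp with hp | ⟨hp, _⟩
      · subst hp
        cases hq : d.get? g.1 with
        | none =>
          have : d.getD g.1 PySem.Set.empty = [] := by
            rw [PySem.Dict.getD_eq_get?_getD, hq]; rfl
          rw [this]
          have : PySem.Set.update ([] : List Int) g.2 = PySem.Set.ofList g.2 := rfl
          rw [this, PySem.Set.ofList_eq_self_of_nodup _ hgnd]
          exact ⟨hglen, hgnd⟩
        | some ps =>
          have hgd : d.getD g.1 PySem.Set.empty = ps := by
            rw [PySem.Dict.getD_eq_get?_getD, hq]; rfl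
          have hpsmem : (g.1, ps) ∈ d.items := PySem.Dict.mem_items_of_get?_eq_some _ hq
          obtain ⟨hpl, hpn⟩ := hval _ hpsmem
          simp only at hpl hpn
          rw [hgd, PySem.Set.update_eq_append_filter]
          constructor
          · rw [List.length_append]; omega
          · apply List.Nodup.append hpn ((PySem.Set.nodup_ofList _).filter _)
            intro y hy hy2
            have := (List.mem_filter.mp hy2).2
            simp [PySem.Set.contains_eq_listContains, hy] at this
      · exact hval p hp

lemma pvGroupProps (f : Int → String) (E : Int) :
    ∀ g ∈ (pvGather (pvPairs f 0 E)).filter pvQ, 1 < g.2.length ∧ g.2.Nodup := by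
  intro g hg
  rw [List.mem_filter] at hg
  obtain ⟨hg, hq⟩ := hg
  refine ⟨by simpa [pvQ] using hq, ?_⟩
  have hpw : (pvPairs f 0 E).Pairwise (fun p q => p.2 < q.2) := by
    rw [pvPairs, List.pairwise_map]
    exact PySem.List.pairwise_lt_pyRange_one 0 E
  exact (pvGather_pairwise _ hpw g hg).nodup

lemma pvBRound (f : Int → String) (E : Int) (D : PySem.Dict String (List Int)) :
    (((PySem.List.pyRange 0 E 1).foldl (fun g i =>
        g.insert (f i) (g.getD (f i) [] ++ [i])) PySem.Dict.empty).items).foldl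
      (fun rep p => if 1 < p.2.length then
          rep.insert p.1 (PySem.Set.update (rep.getD p.1 PySem.Set.empty) p.2)
        else rep) D
    = pvMerge D ((pvGather (pvPairs f 0 E)).filter pvQ) := by
  have h1 : (PySem.List.pyRange 0 E 1).foldl (fun g i =>
        g.insert (f i) (g.getD (f i) [] ++ [i])) PySem.Dict.empty
      = (pvPairs f 0 E).foldl (fun g p => g.insert p.1 (g.getD p.1 [] ++ [p.2])) PySem.Dict.empty := by
    rw [pvPairs, List.foldl_map]
  rw [h1, pvGruposItems]
  show List.foldl (fun rep p => if 1 < p.2.length then pvMergeStep rep p else rep) D (pvGather (pvPairs f 0 E))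
    = pvMerge D (List.filter pvQ (pvGather (pvPairs f 0 E)))
  rw [← pv_foldl_filter_prop (P := fun (p : String × List Int) => 1 < p.2.length) pvMergeStep _ D]
  rfl

lemma pvRounds (c : String) (n : Int) : ∀ (Ls : List Int) (D : PySem.Dict String (List Int)), pvInv D →
    (Ls.foldl (fun rep L =>
        (PySem.List.pyRange 0 (n - L + 1) 1).foldl
          (pvStep (fun i => PySem.Str.slice c (some i) (some (i + L))) (n - L + 1)) rep) D
      = Ls.foldl (fun rep L =>
        (((PySem.List.pyRange 0 (n - L + 1) 1).foldl (fun g i =>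
            g.insert (PySem.Str.slice c (some i) (some (i + L)))
              (g.getD (PySem.Str.slice c (some i) (some (i + L))) [] ++ [i])) PySem.Dict.empty).items).foldl
          (fun rep p => if 1 < p.2.length then
              rep.insert p.1 (PySem.Set.update (rep.getD p.1 PySem.Set.empty) p.2)
            else rep) rep) D)
    ∧ pvInv (Ls.foldl (fun rep L =>
        (PySem.List.pyRange 0 (n - L + 1) 1).foldl
          (pvStep (fun i => PySem.Str.slice c (some i) (some (i + L))) (n - L + 1)) rep) D) := by
  intro Ls
  induction Ls with
  | nil => intro D hD; exact ⟨rfl, hD⟩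
  | cons L Ls ih =>
    intro D hD
    rw [List.foldl_cons, List.foldl_cons]
    have hstep : (PySem.List.pyRange 0 (n - L + 1) 1).foldl
          (pvStep (fun i => PySem.Str.slice c (some i) (some (i + L))) (n - L + 1)) D
        = pvMerge D ((pvGather (pvPairs (fun i => PySem.Str.slice c (some i) (some (i + L))) 0 (n - L + 1))).filter pvQ) :=
      pvRound _ _ 0 D hD.1
    have hstepB := pvBRound (fun i => PySem.Str.slice c (some i) (some (i + L))) (n - L + 1) D
    rw [hstep, hstepB]
    exact ih _ (pvMerge_inv _ _ hD (pvGroupProps _ _))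

lemma pvFinal (rep : PySem.Dict String (List Int)) (h : pvInv rep) :
    (rep.items.foldl (fun acc p =>
        if 1 < p.2.length then acc.insert p.1 (PySem.List.sorted (PySem.Set.ofList p.2) (fun x => x) false) else acc)
      (PySem.Dict.empty : PySem.Dict String (List Int))).items
    = (rep.items.foldl (fun acc p => acc.insert p.1 (PySem.List.sorted p.2 (fun x => x) false))
      (PySem.Dict.empty : PySem.Dict String (List Int))).items := by
  obtain ⟨hnd, hval⟩ := h
  have hmapnd : (rep.items.map (·.1)).Nodup := hnd
  rw [← pv_foldl_filter_prop (P := fun (p : String × List Int) => 1 < p.2.length)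
        (fun acc p => acc.insert p.1 (PySem.List.sorted (PySem.Set.ofList p.2) (fun x => x) false)) rep.items PySem.Dict.empty]
  rw [List.filter_eq_self.mpr (fun p hp => by simpa using (hval p hp).1)]
  rw [PySem.Dict.items_foldl_insert_fresh rep.items (·.1)
        (fun p => PySem.List.sorted (PySem.Set.ofList p.2) (fun x => x) false) PySem.Dict.empty
        (fun a _ => PySem.Dict.contains_empty _) hmapnd]
  rw [PySem.Dict.items_foldl_insert_fresh rep.items (·.1)
        (fun p => PySem.List.sorted p.2 (fun x => x) false) PySem.Dict.empty
        (fun a _ => PySem.Dict.contains_empty _) hmapnd]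
  apply List.map_congr_left
  intro p hp
  rw [PySem.Set.ofList_eq_self_of_nodup _ (hval p hp).2]

lemma pvMain (c : String) (m : Int) :
    analizar_repeticiones_kasiski c m = analizar_repeticiones_kasiski_alt c m := by
  have hinv0 : pvInv PySem.Dict.empty :=
    ⟨PySem.Dict.nodup_keys_empty, fun p hp => absurd hp (by simp [PySem.Dict.empty])⟩
  obtain ⟨heq, hinv⟩ := pvRounds c (PySem.Str.len c)
    (PySem.List.pyRange m (PySem.Int.floordiv (PySem.Str.len c) 2 + 1) 1) PySem.Dict.empty hinv0
  show (((PySem.List.pyRange m (PySem.Int.floordiv (PySem.Str.len c) 2 + 1) 1).foldl (fun rep L =>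
          (PySem.List.pyRange 0 (PySem.Str.len c - L + 1) 1).foldl
            (pvStep (fun i => PySem.Str.slice c (some i) (some (i + L))) (PySem.Str.len c - L + 1)) rep)
        PySem.Dict.empty).items.foldl (fun acc p =>
          if 1 < p.2.length then acc.insert p.1 (PySem.List.sorted (PySem.Set.ofList p.2) (fun x => x) false) else acc)
        (PySem.Dict.empty : PySem.Dict String (List Int))).items
    = (((PySem.List.pyRange m (PySem.Int.floordiv (PySem.Str.len c) 2 + 1) 1).foldl (fun rep L =>
        (((PySem.List.pyRange 0 (PySem.Str.len c - L + 1) 1).foldl (fun g i =>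
            g.insert (PySem.Str.slice c (some i) (some (i + L)))
              (g.getD (PySem.Str.slice c (some i) (some (i + L))) [] ++ [i])) PySem.Dict.empty).items).foldl
          (fun rep p => if 1 < p.2.length then
              rep.insert p.1 (PySem.Set.update (rep.getD p.1 PySem.Set.empty) p.2)
            else rep) rep) PySem.Dict.empty).items.foldl
        (fun acc p => acc.insert p.1 (PySem.List.sorted p.2 (fun x => x) false))
        (PySem.Dict.empty : PySem.Dict String (List Int))).items
  rw [← heq]
  exact pvFinal _ hinv

-- ===== VERDICT (by name: the statement is the Claim_ definition above) =====
theorem analizar_repeticiones_kasiski_spec : Claim_equal_analizar_repeticiones_kasiski := by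
  intro c m _
  exact pvMain c m
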